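-- pv_equiv track=rewrite | github.com/bunkerity/bunkerweb | src/api/app/rate_limit.py | _limit_string
-- ===== SOURCE A (Python) =====
-- def _limit_string(times: int, seconds: int) -> str:
--     # Prefer friendly units when we can express exactly
--     if seconds in (1, 60, 3600, 86400, 2592000, 31536000):
--         unit_map = {1: "second", 60: "minute", 3600: "hour", 86400: "day", 2592000: "month", 31536000: "year"}
--         unit = unit_map[seconds]
--         return f"{times}/{unit}"
--
--     for base, name in ((31536000, "year"), (2592000, "month"), (86400, "day"), (3600, "hour"), (60, "minute")):
--         if seconds % base == 0:
--             n = seconds // base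
--             plural = name + ("s" if n != 1 else "")
--             return f"{times}/{n}{plural}"
--
--     return f"{times} per {seconds} seconds"
-- ===== SOURCE B (Python) =====
-- def _limit_string(times: int, seconds: int) -> str:
--     if seconds == 1:
--         return f"{times}/second"
--     if seconds % 60:
--         return f"{times} per {seconds} seconds"
--     n, unit = seconds // 60, "minute"
--     if n % 60 == 0:
--         n, unit = n // 60, "hour"
--         if n % 24 == 0:
--             n, unit = n // 24, "day"
--             if n % 365 == 0:
--                 n, unit = n // 365, "year"
--             elif n % 30 == 0:
--                 n, unit = n // 30, "month"
--     return f"{times}/{unit}" if n == 1 else f"{times}/{n}{unit}s"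
-- ===== Notes on version B (the rewrite author's own statement) =====
-- stated objective: alternative
-- what changed: Replaced the unit-table scan (set fast path + dict + descending divisibility loop) by a table-free ascending factorization ladder: divide out 60, 60, 24 stepwise while divisible, then classify the day count by 365 (year) or 30 (month); no unit list exists in B.
import Mathlib
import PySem

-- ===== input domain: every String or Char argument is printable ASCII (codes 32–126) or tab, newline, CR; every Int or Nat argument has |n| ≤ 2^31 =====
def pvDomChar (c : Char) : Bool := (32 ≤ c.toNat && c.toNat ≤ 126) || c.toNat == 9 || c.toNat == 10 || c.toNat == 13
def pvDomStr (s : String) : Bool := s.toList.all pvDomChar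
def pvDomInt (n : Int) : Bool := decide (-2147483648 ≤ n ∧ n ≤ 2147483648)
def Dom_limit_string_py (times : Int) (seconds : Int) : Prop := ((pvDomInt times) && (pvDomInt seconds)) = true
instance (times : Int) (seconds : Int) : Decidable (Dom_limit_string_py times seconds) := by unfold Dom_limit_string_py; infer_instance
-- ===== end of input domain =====

-- B replaces A's unit table (set fast path + dict + descending loop) by a table-free ascending factorization ladder; objective: alternative.


-- ===== PORT A =====
-- A's for-loop with early return, as structural recursion over the (base, name) list
def limitA_loop (times : Int) (seconds : Int) : List (Int × String) → String
  | [] => PySem.Int.toStr times ++ " per " ++ PySem.Int.toStr seconds ++ " seconds"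
  | (base, name) :: rest =>
    if PySem.Int.mod seconds base = 0 then
      let n := PySem.Int.floordiv seconds base
      let plural := name ++ (if n ≠ 1 then "s" else "")
      PySem.Int.toStr times ++ "/" ++ PySem.Int.toStr n ++ plural
    else limitA_loop times seconds rest

def limit_string_py (times : Int) (seconds : Int) : String :=
  if seconds = 1 ∨ seconds = 60 ∨ seconds = 3600 ∨ seconds = 86400 ∨ seconds = 2592000 ∨ seconds = 31536000 then
    let unit_map : PySem.Dict Int String := PySem.Dict.ofList
      [(1, "second"), (60, "minute"), (3600, "hour"), (86400, "day"), (2592000, "month"), (31536000, "year")]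
    let unit := (PySem.Dict.get? unit_map seconds).getD ""   -- key present whenever this branch runs, so no KeyError
    PySem.Int.toStr times ++ "/" ++ unit
  else
    limitA_loop times seconds
      [(31536000, "year"), (2592000, "month"), (86400, "day"), (3600, "hour"), (60, "minute")]

-- ===== PORT B =====
-- B's ascending ladder: divide out 60, 60, 24, then classify the day count by 365 / 30;
-- the reassigned Python pair (n, unit) becomes a nested-if expression producing the final pair.
def limit_string_py_alt (times : Int) (seconds : Int) : String :=
  if seconds = 1 then PySem.Int.toStr times ++ "/second"
  else if PySem.Int.mod seconds 60 ≠ 0 then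
    PySem.Int.toStr times ++ " per " ++ PySem.Int.toStr seconds ++ " seconds"
  else
    let p0 : Int × String := (PySem.Int.floordiv seconds 60, "minute")
    let p : Int × String :=
      if PySem.Int.mod p0.1 60 = 0 then
        let p1 : Int × String := (PySem.Int.floordiv p0.1 60, "hour")
        if PySem.Int.mod p1.1 24 = 0 then
          let p2 : Int × String := (PySem.Int.floordiv p1.1 24, "day")
          if PySem.Int.mod p2.1 365 = 0 then (PySem.Int.floordiv p2.1 365, "year")
          else if PySem.Int.mod p2.1 30 = 0 then (PySem.Int.floordiv p2.1 30, "month")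
          else p2
        else p1
      else p0
    if p.1 = 1 then PySem.Int.toStr times ++ "/" ++ p.2
    else PySem.Int.toStr times ++ "/" ++ PySem.Int.toStr p.1 ++ p.2 ++ "s"

-- ===== PRECONDITION & SPEC =====
def Spec_limit_string_py (times : Int) (seconds : Int) (out : String) : Prop := out = limit_string_py_alt times seconds
instance (times : Int) (seconds : Int) (out : String) : Decidable (Spec_limit_string_py times seconds out) := by unfold Spec_limit_string_py; infer_instance

-- ===== CLAIM (what is proved, stated in full; the proofs are below) =====
def Claim_equal_limit_string_py : Prop := ∀ (times : Int) (seconds : Int), Dom_limit_string_py times seconds → Spec_limit_string_py times seconds (limit_string_py times seconds)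

-- ===== LEMMAS AND PROOFS =====

-- the generic case: the descending scan and the ascending ladder agree when s avoids the six exact-unit values
theorem scan_eq_ladder (t s : Int) (h60 : s ≠ 60) (h3600 : s ≠ 3600)
    (h86400 : s ≠ 86400) (hmo : s ≠ 2592000) (hyr : s ≠ 31536000) :
    limitA_loop t s [(31536000, "year"), (2592000, "month"), (86400, "day"), (3600, "hour"), (60, "minute")]
      =
    (if PySem.Int.mod s 60 ≠ 0 then
      PySem.Int.toStr t ++ " per " ++ PySem.Int.toStr s ++ " seconds"
    else
      let p0 : Int × String := (PySem.Int.floordiv s 60, "minute")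
      let p : Int × String :=
        if PySem.Int.mod p0.1 60 = 0 then
          let p1 : Int × String := (PySem.Int.floordiv p0.1 60, "hour")
          if PySem.Int.mod p1.1 24 = 0 then
            let p2 : Int × String := (PySem.Int.floordiv p1.1 24, "day")
            if PySem.Int.mod p2.1 365 = 0 then (PySem.Int.floordiv p2.1 365, "year")
            else if PySem.Int.mod p2.1 30 = 0 then (PySem.Int.floordiv p2.1 30, "month")
            else p2
          else p1
        else p0
      if p.1 = 1 then PySem.Int.toStr t ++ "/" ++ p.2
      else PySem.Int.toStr t ++ "/" ++ PySem.Int.toStr p.1 ++ p.2 ++ "s") := by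
  simp only [limitA_loop]
  simp only [show ∀ a : Int, PySem.Int.mod a 31536000 = a % 31536000 from fun a => PySem.Int.mod_eq_emod_of_pos (by norm_num), show ∀ a : Int, PySem.Int.mod a 2592000 = a % 2592000 from fun a => PySem.Int.mod_eq_emod_of_pos (by norm_num), show ∀ a : Int, PySem.Int.mod a 86400 = a % 86400 from fun a => PySem.Int.mod_eq_emod_of_pos (by norm_num), show ∀ a : Int, PySem.Int.mod a 3600 = a % 3600 from fun a => PySem.Int.mod_eq_emod_of_pos (by norm_num), show ∀ a : Int, PySem.Int.mod a 60 = a % 60 from fun a => PySem.Int.mod_eq_emod_of_pos (by norm_num), show ∀ a : Int, PySem.Int.mod a 24 = a % 24 from fun a => PySem.Int.mod_eq_emod_of_pos (by norm_num), show ∀ a : Int, PySem.Int.mod a 365 = a % 365 from fun a => PySem.Int.mod_eq_emod_of_pos (by norm_num), show ∀ a : Int, PySem.Int.mod a 30 = a % 30 from fun a => PySem.Int.mod_eq_emod_of_pos (by norm_num), show ∀ a : Int, PySem.Int.floordiv a 31536000 = a / 31536000 from fun a => PySem.Int.floordiv_eq_ediv_of_pos (by norm_num), show ∀ a : Int, PySem.Int.floordiv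 a 2592000 = a / 2592000 from fun a => PySem.Int.floordiv_eq_ediv_of_pos (by norm_num), show ∀ a : Int, PySem.Int.floordiv a 86400 = a / 86400 from fun a => PySem.Int.floordiv_eq_ediv_of_pos (by norm_num), show ∀ a : Int, PySem.Int.floordiv a 3600 = a / 3600 from fun a => PySem.Int.floordiv_eq_ediv_of_pos (by norm_num), show ∀ a : Int, PySem.Int.floordiv a 60 = a / 60 from fun a => PySem.Int.floordiv_eq_ediv_of_pos (by norm_num), show ∀ a : Int, PySem.Int.floordiv a 24 = a / 24 from fun a => PySem.Int.floordiv_eq_ediv_of_pos (by norm_num), show ∀ a : Int, PySem.Int.floordiv a 365 = a / 365 from fun a => PySem.Int.floordiv_eq_ediv_of_pos (by norm_num), show ∀ a : Int, PySem.Int.floordiv a 30 = a / 30 from fun a => PySem.Int.floordiv_eq_ediv_of_pos (by norm_num)]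
  by_cases hy2 : s % 31536000 = 0
  · have e1 : s % 60 = 0 := by omega
    have e2 : (s/60) % 60 = 0 := by omega
    have e3 : ((s/60)/60) % 24 = 0 := by omega
    have e4 : (((s/60)/60)/24) % 365 = 0 := by omega
    have hn : ¬ (s / 31536000 = 1) := by omega
    have hq : (((s/60)/60)/24)/365 = s/31536000 := by omega
    simp [hy2, e1, e2, e3, e4, hq, hn, String.append_assoc]
  · by_cases hm2 : s % 2592000 = 0
    · have e1 : s % 60 = 0 := by omega
      have e2 : (s/60) % 60 = 0 := by omega
      have e3 : ((s/60)/60) % 24 = 0 := by omega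
      have e4 : ¬ ((((s/60)/60)/24) % 365 = 0) := by omega
      have e5 : (((s/60)/60)/24) % 30 = 0 := by omega
      have hn : ¬ (s / 2592000 = 1) := by omega
      have hq : (((s/60)/60)/24)/30 = s/2592000 := by omega
      simp [hy2, hm2, e1, e2, e3, e4, e5, hq, hn, String.append_assoc]
    · by_cases hd2 : s % 86400 = 0
      · have e1 : s % 60 = 0 := by omega
        have e2 : (s/60) % 60 = 0 := by omega
        have e3 : ((s/60)/60) % 24 = 0 := by omega
        have e4 : ¬ ((((s/60)/60)/24) % 365 = 0) := by omega
        have e5 : ¬ ((((s/60)/60)/24) % 30 = 0) := by omega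
        have hn : ¬ (s / 86400 = 1) := by omega
        have hq : ((s/60)/60)/24 = s/86400 := by omega
        have d4 : ¬ ((365:Int) ∣ s/86400) := by omega
        have d5 : ¬ ((30:Int) ∣ s/86400) := by omega
        simp [hy2, hm2, hd2, e1, e2, e3, hq, hn, d4, d5, String.append_assoc]
      · by_cases hh2 : s % 3600 = 0
        · have e1 : s % 60 = 0 := by omega
          have e2 : (s/60) % 60 = 0 := by omega
          have e3 : ¬ (((s/60)/60) % 24 = 0) := by omega
          have hn : ¬ (s / 3600 = 1) := by omega
          have hq : (s/60)/60 = s/3600 := by omega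
          have d3 : ¬ ((24:Int) ∣ s/3600) := by omega
          simp [hy2, hm2, hd2, hh2, e1, e2, hq, hn, d3, String.append_assoc]
        · by_cases hmin : s % 60 = 0
          · have e2 : ¬ ((s/60) % 60 = 0) := by omega
            have hn : ¬ (s / 60 = 1) := by omega
            have d2 : ¬ ((60:Int) ∣ s/60) := by omega
            simp [hy2, hm2, hd2, hh2, hmin, e2, hn, String.append_assoc]
          · simp [hy2, hm2, hd2, hh2, hmin, String.append_assoc]

-- ===== VERDICT (by name: the statement is the Claim_ definition above) =====
theorem limit_string_py_spec : Claim_equal_limit_string_py := by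
  intro t s _
  unfold Spec_limit_string_py limit_string_py limit_string_py_alt
  by_cases h1 : s = 1
  · subst h1
    simp [PySem.Dict.get?, PySem.Dict.ofList, PySem.Dict.update, PySem.Dict.empty, PySem.Dict.insert, PySem.Dict.contains, String.append_assoc]
  · rcases eq_or_ne s 60 with h | h60
    · subst h
      norm_num [PySem.Dict.get?, PySem.Dict.ofList, PySem.Dict.update, PySem.Dict.empty, PySem.Dict.insert, PySem.Dict.contains,
        PySem.Int.mod, PySem.Int.floordiv, Int.fmod, Int.fdiv, String.append_assoc]
    · rcases eq_or_ne s 3600 with h | h3600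
      · subst h
        norm_num [PySem.Dict.get?, PySem.Dict.ofList, PySem.Dict.update, PySem.Dict.empty, PySem.Dict.insert, PySem.Dict.contains,
          PySem.Int.mod, PySem.Int.floordiv, Int.fmod, Int.fdiv, String.append_assoc]
      · rcases eq_or_ne s 86400 with h | h86400
        · subst h
          norm_num [PySem.Dict.get?, PySem.Dict.ofList, PySem.Dict.update, PySem.Dict.empty, PySem.Dict.insert, PySem.Dict.contains,
            PySem.Int.mod, PySem.Int.floordiv, Int.fmod, Int.fdiv, String.append_assoc]
        · rcases eq_or_ne s 2592000 with h | hmo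
          · subst h
            norm_num [PySem.Dict.get?, PySem.Dict.ofList, PySem.Dict.update, PySem.Dict.empty, PySem.Dict.insert, PySem.Dict.contains,
              PySem.Int.mod, PySem.Int.floordiv, Int.fmod, Int.fdiv, String.append_assoc]
          · rcases eq_or_ne s 31536000 with h | hyr
            · subst h
              norm_num [PySem.Dict.get?, PySem.Dict.ofList, PySem.Dict.update, PySem.Dict.empty, PySem.Dict.insert, PySem.Dict.contains,
                PySem.Int.mod, PySem.Int.floordiv, Int.fmod, Int.fdiv, String.append_assoc]
            · rw [if_neg (by tauto), if_neg h1]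
              exact scan_eq_ladder t s h60 h3600 h86400 hmo hyr
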